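-- pv_equiv track=rewrite | github.com/LonpatovaAdelina/Agents | hooks/pre_tool_call/block_delete.py | is_protected_path
-- ===== SOURCE A (Python) =====
-- PROTECTED_FILES = {
--     "AGENT.md",
--     "SKILL.md",
--     "create-prd.md",
--     "PRD.md",
--     "ARCHITECTURE.md",
--     "README.md",
-- }
--
-- PROTECTED_DIRS = {
--     "skills/",
--     "commands/",
--     "hooks/",
-- }
--
-- def is_protected_path(path: str) -> bool:
--     filename = path.split("/")[-1]
--     if filename in PROTECTED_FILES:
--         return True
--     for protected_dir in PROTECTED_DIRS:
--         if path.startswith(protected_dir) or f"/{protected_dir}" in path: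
--             return True
--     return False
-- ===== SOURCE B (Python) =====
-- PROTECTED_FILES = {
--     "AGENT.md",
--     "SKILL.md",
--     "create-prd.md",
--     "PRD.md",
--     "ARCHITECTURE.md",
--     "README.md",
-- }
--
-- PROTECTED_DIR_NAMES = {"skills", "commands", "hooks"}
--
--
-- def is_protected_path(path: str) -> bool:
--     parts = path.split("/")
--     if parts[-1] in PROTECTED_FILES:
--         return True
--     return any(seg in PROTECTED_DIR_NAMES for seg in parts[:-1])
-- ===== Notes on version B (the rewrite author's own statement) =====
-- stated objective: simpler
-- what changed: Replaces the per-directory startswith/substring scans with a single tokenization: split the path once on the separator and test every non-final segment for membership in a set of bare directory names.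
import Mathlib
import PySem

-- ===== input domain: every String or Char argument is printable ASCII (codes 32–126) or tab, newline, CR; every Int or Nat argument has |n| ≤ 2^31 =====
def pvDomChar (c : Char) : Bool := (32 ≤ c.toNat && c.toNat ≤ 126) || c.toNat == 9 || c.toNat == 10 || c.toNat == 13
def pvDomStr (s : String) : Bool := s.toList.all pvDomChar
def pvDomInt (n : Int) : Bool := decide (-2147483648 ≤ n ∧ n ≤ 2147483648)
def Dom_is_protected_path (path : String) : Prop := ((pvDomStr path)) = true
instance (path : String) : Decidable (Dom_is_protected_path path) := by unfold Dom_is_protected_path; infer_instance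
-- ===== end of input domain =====

-- B replaces A's per-directory startswith/substring scans by one split on '/' and a
-- membership test of every non-final segment against the bare directory names (objective: simpler).

-- ===== PORT A =====
def pvProtectedFiles : List String :=
  ["AGENT.md", "SKILL.md", "create-prd.md", "PRD.md", "ARCHITECTURE.md", "README.md"]

def pvProtectedDirs : List String := ["skills/", "commands/", "hooks/"]

def is_protected_path (path : String) : Bool :=
  let filename := (PySem.List.pyGet? ((PySem.Str.split? path "/").getD []) (-1)).getD ""
  if pvProtectedFiles.contains filename then true
  else
    pvProtectedDirs.any (fun d =>
      PySem.Str.startswith path d || PySem.Str.isIn ("/" ++ d) path)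

-- ===== PORT B =====
def pvProtectedDirNames : List String := ["skills", "commands", "hooks"]

def is_protected_path_alt (path : String) : Bool :=
  let parts := (PySem.Str.split? path "/").getD []
  if pvProtectedFiles.contains ((PySem.List.pyGet? parts (-1)).getD "") then true
  else
    (PySem.List.slice parts none (some (-1))).any (fun seg => pvProtectedDirNames.contains seg)

-- ===== PRECONDITION & SPEC =====
def Spec_is_protected_path (path : String) (out : Bool) : Prop := out = is_protected_path_alt path
instance (path : String) (out : Bool) : Decidable (Spec_is_protected_path path out) := by unfold Spec_is_protected_path; infer_instance

-- ===== CLAIM (what is proved, stated in full; the proofs are below) =====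
def Claim_equal_is_protected_path : Prop := ∀ (path : String), Dom_is_protected_path path → Spec_is_protected_path path (is_protected_path path)

-- ===== LEMMAS AND PROOFS =====

/-- Structural single-character split, used only to reason about `PySem.Chars.splitOn`. -/
def pvSplit (c : Char) : List Char → List (List Char)
  | [] => [[]]
  | a :: rest =>
    if a = c then [] :: pvSplit c rest
    else (a :: (pvSplit c rest).headI) :: (pvSplit c rest).tail

lemma pvSplit_ne_nil (c : Char) (l : List Char) : pvSplit c l ≠ [] := by
  cases l with
  | nil => simp [pvSplit]
  | cons a rest => simp only [pvSplit]; split <;> simp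

lemma pvSplit_eq_cons (c : Char) (l : List Char) :
    pvSplit c l = (pvSplit c l).headI :: (pvSplit c l).tail := by
  cases h : pvSplit c l with
  | nil => exact absurd h (pvSplit_ne_nil c l)
  | cons x xs => simp

lemma splitOn_go_eq (c : Char) :
    ∀ (fuel : Nat) (l cur : List Char) (acc : List (List Char)), l.length < fuel →
      PySem.Chars.splitOn.go [c] fuel l cur acc
        = acc.reverse ++ ((cur.reverse ++ (pvSplit c l).headI) :: (pvSplit c l).tail) := by
  intro fuel
  induction fuel with
  | zero => intro l cur acc h; omega
  | succ n ih =>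
    intro l cur acc h
    cases l with
    | nil =>
      rw [PySem.Chars.splitOn.go]
      simp [pvSplit]
      omega
    | cons a rest =>
      by_cases hac : a = c
      · subst hac
        rw [PySem.Chars.splitOn.go]
        simp only [List.isPrefixOf, beq_self_eq_true, Bool.true_and, if_pos]
        rw [show ((a :: rest).drop [a].length) = rest from rfl]
        rw [ih rest [] (cur.reverse :: acc) (by simpa using Nat.lt_of_succ_lt_succ h)]
        simp [pvSplit, ← pvSplit_eq_cons]
      · rw [PySem.Chars.splitOn.go]
        have hif : [c].isPrefixOf (a :: rest) = false := by
          simp [List.isPrefixOf, Ne.symm hac]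
        rw [hif]
        simp only [Bool.false_eq_true, if_false]
        rw [ih rest (a :: cur) acc (by simpa using Nat.lt_of_succ_lt_succ h)]
        simp only [pvSplit, if_neg hac]
        simp

lemma splitOn_singleton (c : Char) (l : List Char) :
    PySem.Chars.splitOn l [c] = pvSplit c l := by
  unfold PySem.Chars.splitOn
  rw [splitOn_go_eq c (l.length + 1) l [] [] (by omega)]
  simp [← pvSplit_eq_cons]

lemma prefix_seg (c : Char) (w seg rest : List Char) (hw : c ∉ w) (hs : c ∉ seg) :
    (w ++ [c] <+: seg ++ c :: rest) ↔ w = seg := by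
  induction seg generalizing w with
  | nil =>
    cases w with
    | nil => simp
    | cons b w' =>
      have : b ≠ c := fun h => hw (h ▸ List.mem_cons_self)
      simp [List.cons_prefix_cons, this]
  | cons a seg' ih =>
    have ha : a ≠ c := fun h => hs (h ▸ List.mem_cons_self)
    cases w with
    | nil =>
      have hca : c ≠ a := Ne.symm ha
      simp [List.cons_prefix_cons, hca]
    | cons b w' =>
      have hw' : c ∉ w' := fun h => hw (List.mem_cons_of_mem _ h)
      have hs' : c ∉ seg' := fun h => hs (List.mem_cons_of_mem _ h)
      simp [List.cons_prefix_cons, ih w' hw' hs']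

lemma infix_seg (c : Char) (u seg rest : List Char) (hs : c ∉ seg) :
    (c :: u <:+: seg ++ c :: rest) ↔ (u <+: rest ∨ c :: u <:+: rest) := by
  induction seg with
  | nil => simp [List.infix_cons_iff, List.cons_prefix_cons]
  | cons a seg' ih =>
    have ha : a ≠ c := fun h => hs (h ▸ List.mem_cons_self)
    have hs' : c ∉ seg' := fun h => hs (List.mem_cons_of_mem _ h)
    simp only [List.cons_append, List.infix_cons_iff, List.cons_prefix_cons]
    have hca : c ≠ a := Ne.symm ha
    simp [hca, ih hs']

lemma pvSplit_no_sep (c : Char) (l : List Char) (hc : c ∉ l) : pvSplit c l = [l] := by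
  induction l with
  | nil => rfl
  | cons a rest ih =>
    have ha : a ≠ c := fun h => hc (h ▸ List.mem_cons_self)
    have hc' : c ∉ rest := fun h => hc (List.mem_cons_of_mem _ h)
    simp [pvSplit, ih hc', ha]

lemma pvSplit_append (c : Char) (seg rest : List Char) (hs : c ∉ seg) :
    pvSplit c (seg ++ c :: rest) = seg :: pvSplit c rest := by
  induction seg with
  | nil => simp [pvSplit]
  | cons a seg' ih =>
    have ha : a ≠ c := fun h => hs (h ▸ List.mem_cons_self)
    have hs' : c ∉ seg' := fun h => hs (List.mem_cons_of_mem _ h)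
    simp [pvSplit, ha, ih hs']

lemma pv_main (c : Char) (w : List Char) (hw : w ≠ []) (hcw : c ∉ w) (l : List Char) :
    ((w ++ [c] <+: l) ∨ (c :: (w ++ [c]) <:+: l)) ↔ w ∈ (pvSplit c l).dropLast := by
  by_cases hc : c ∈ l
  · -- l = seg ++ c :: rest with c ∉ seg
    have hdec := List.takeWhile_append_dropWhile (p := fun x => x ≠ c) (l := l)
    set seg := l.takeWhile (fun x => x ≠ c) with hseg
    have hs : c ∉ seg := by
      intro h
      have := List.mem_takeWhile_imp h
      simp at this
    cases hdw : l.dropWhile (fun x => x ≠ c) with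
    | nil =>
      exfalso
      have : ∀ x ∈ l, x ≠ c := by
        have := List.dropWhile_eq_nil_iff (l := l) (p := fun x => x ≠ c)
        rw [hdw] at this
        simpa using this.mp rfl
      exact this c hc rfl
    | cons a rest =>
      have hac : a = c := by
        have h := List.head_dropWhile_not (p := fun x => decide (x ≠ c)) (l := l)
        rw [hdw] at h
        simpa using h (by simp)
      subst hac
      have hl : l = seg ++ a :: rest := by rw [← hdec, hdw]
      have hlen : rest.length < l.length := by
        rw [hl]; simp; omega
      rw [hl, prefix_seg a w seg rest hcw hs, infix_seg a (w ++ [a]) seg rest hs,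
        pvSplit_append a seg rest hs]
      rw [pvSplit_eq_cons a rest]
      simp only [List.dropLast_cons₂, List.mem_cons]
      rw [← pvSplit_eq_cons a rest]
      rw [pv_main a w hw hcw rest]
  · rw [pvSplit_no_sep c l hc]
    simp only [List.dropLast, List.not_mem_nil, iff_false]
    rintro (h | h)
    · exact hc (h.subset (by simp))
    · exact hc (h.subset (by simp))
termination_by l.length
decreasing_by exact hlen

lemma any_or_split (l : List (List Char)) (p q : List Char → Bool) :
    (l.any fun x => p x || q x) = (l.any p || l.any q) := by
  induction l with
  | nil => simp
  | cons a t ih => simp only [List.any_cons, ih]; ac_rfl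

lemma pv_main_bool (c : Char) (w l : List Char) (hw : w ≠ []) (hcw : c ∉ w) :
    (PySem.Chars.startswith l (w ++ [c]) || PySem.Chars.isIn (c :: (w ++ [c])) l)
      = (pvSplit c l).dropLast.any (· == w) := by
  rw [Bool.eq_iff_iff]
  simp only [Bool.or_eq_true, PySem.Chars.startswith_iff, PySem.Chars.isIn_iff_infix,
    List.any_eq_true, beq_iff_eq]
  rw [pv_main c w hw hcw l]
  constructor
  · intro h; exact ⟨w, h, rfl⟩
  · rintro ⟨x, hx, rfl⟩; exact hx

lemma ofList_eq_iff (s : List Char) (t : String) : String.ofList s = t ↔ s = t.toList := by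
  constructor
  · rintro rfl; simp
  · rintro rfl; exact String.ofList_toList

-- ===== VERDICT (by name: the statement is the Claim_ definition above) =====
theorem is_protected_path_spec : Claim_equal_is_protected_path := by
  intro path _
  unfold Spec_is_protected_path is_protected_path is_protected_path_alt
  simp only []
  by_cases hC : pvProtectedFiles.contains
      ((PySem.List.pyGet? ((PySem.Str.split? path "/").getD []) (-1)).getD "") = true
  · rw [if_pos hC, if_pos hC]
  · rw [if_neg hC, if_neg hC]
    have hsplit : (PySem.Str.split? path "/").getD []
        = (pvSplit '/' path.toList).map String.ofList := by
      simp [PySem.Str.split?, PySem.Chars.split?, show "/".toList = ['/'] from rfl,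
        splitOn_singleton]
    rw [hsplit, PySem.List.slice_to_neg_one, ← List.map_dropLast, List.any_map]
    have hnames : ∀ seg : List Char, pvProtectedDirNames.contains (String.ofList seg)
        = (seg == "skills".toList || (seg == "commands".toList || seg == "hooks".toList)) := by
      intro seg
      rw [Bool.eq_iff_iff]
      simp [pvProtectedDirNames, ofList_eq_iff]
    simp only [Function.comp_def, hnames]
    rw [any_or_split, any_or_split]
    have h1 := pv_main_bool '/' "skills".toList path.toList (by decide) (by decide)
    have h2 := pv_main_bool '/' "commands".toList path.toList (by decide) (by decide)
    have h3 := pv_main_bool '/' "hooks".toList path.toList (by decide) (by decide)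
    simp only [pvProtectedDirs, List.any_cons, List.any_nil, Bool.or_false]
    rw [show ("/" ++ "skills/" : String) = "/skills/" from rfl,
      show ("/" ++ "commands/" : String) = "/commands/" from rfl,
      show ("/" ++ "hooks/" : String) = "/hooks/" from rfl]
    simp only [PySem.Str.startswith_eq, PySem.Str.isIn_eq]
    rw [show ("skills/").toList = "skills".toList ++ ['/'] from rfl,
      show ("/skills/").toList = '/' :: ("skills".toList ++ ['/']) from rfl,
      show ("commands/").toList = "commands".toList ++ ['/'] from rfl,
      show ("/commands/").toList = '/' :: ("commands".toList ++ ['/']) from rfl,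
      show ("hooks/").toList = "hooks".toList ++ ['/'] from rfl,
      show ("/hooks/").toList = '/' :: ("hooks".toList ++ ['/']) from rfl]
    rw [h1, h2, h3]
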